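-- pv_equiv track=rewrite | github.com/Anand-/nlp2014_final | approach_ngrams.py | getTrisAndNgramsForBiGrams
-- ===== SOURCE A (Python) =====
-- def getTrisAndNgramsForBiGrams(top_bigrams,top_trigrams,top_ngrams):
--     finallist ={}
--     for b1,b2 in top_bigrams[:15]:
--         finallist[(b1,b2)] = []
--         for t1,t2,t3 in top_trigrams[:30]:
--             added=False
--
--             if b1.lower() in [t1.lower(),t2.lower(),t3.lower()] and b2.lower() in [t1.lower(),t2.lower(),t3.lower()]:
--
--                 for ngram in top_ngrams[:30]:
--                     ngramstring = " ".join(ngram)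
--                     if t1.lower() in ngramstring.lower() and t2.lower() in ngramstring.lower() and t3.lower() in ngramstring.lower():
--                         finallist[(b1,b2)].append(ngram)
--                         added = True
--                 if added == False:
--                     finallist[(b1,b2)].append((t1,t2,t3))
--     return finallist
-- ===== SOURCE B (Python) =====
-- def getTrisAndNgramsForBiGrams(top_bigrams, top_trigrams, top_ngrams):
--     # Build an index once: per trigram, its lowercased key set and the ngrams it matches
--     pool = [(ng, " ".join(ng).lower()) for ng in top_ngrams[:30]]
--     index = []
--     for t1, t2, t3 in top_trigrams[:30]:
--         l1, l2, l3 = t1.lower(), t2.lower(), t3.lower()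
--         matched = [ng for ng, s in pool if l1 in s and l2 in s and l3 in s]
--         index.append(({l1, l2, l3}, matched if matched else [(t1, t2, t3)]))
--     # Consume the index per bigram
--     finallist = {}
--     for b1, b2 in top_bigrams[:15]:
--         out = []
--         for keys, items in index:
--             if b1.lower() in keys and b2.lower() in keys:
--                 out.extend(items)
--         finallist[(b1, b2)] = out
--     return finallist
-- ===== Notes on version B (the rewrite author's own statement) =====
-- stated objective: faster
-- what changed: B precomputes, in one pass over top_trigrams[:30], each trigram's lowercased key set and its matching ngrams (ngram join-strings lowered once), then a second pass over top_bigrams[:15] only consumes this index, removing the per-bigram rescan of all ngrams.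
import Mathlib
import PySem

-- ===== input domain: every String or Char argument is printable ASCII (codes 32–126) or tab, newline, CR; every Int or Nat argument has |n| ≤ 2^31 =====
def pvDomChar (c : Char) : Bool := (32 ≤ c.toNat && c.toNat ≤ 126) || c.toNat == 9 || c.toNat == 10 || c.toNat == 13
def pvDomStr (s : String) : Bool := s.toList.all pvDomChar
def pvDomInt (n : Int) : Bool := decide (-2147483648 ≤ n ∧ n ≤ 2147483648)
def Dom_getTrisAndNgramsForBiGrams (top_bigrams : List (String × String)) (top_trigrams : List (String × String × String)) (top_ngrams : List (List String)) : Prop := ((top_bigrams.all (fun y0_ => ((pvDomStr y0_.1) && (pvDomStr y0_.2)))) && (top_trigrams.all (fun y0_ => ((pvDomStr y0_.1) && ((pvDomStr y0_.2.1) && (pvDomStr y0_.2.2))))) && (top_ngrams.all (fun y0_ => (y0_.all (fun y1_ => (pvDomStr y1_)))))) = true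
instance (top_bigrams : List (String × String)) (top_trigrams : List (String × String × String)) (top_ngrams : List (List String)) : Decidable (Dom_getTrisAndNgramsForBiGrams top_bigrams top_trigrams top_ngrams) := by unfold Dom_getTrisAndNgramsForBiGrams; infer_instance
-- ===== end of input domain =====

-- B builds a trigram→matched-ngrams index in one pass, then the bigram pass only consumes it (objective: faster).
-- A's Python returns a dict; per the type convention it is its insertion-ordered item list, the appended (t1,t2,t3) tuple as [t1,t2,t3].

-- ===== PORT A =====
def pvA_ngCond (t1 t2 t3 : String) (ngram : List String) : Bool :=
  let ngramstring := PySem.Str.join " " ngram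
  PySem.Str.isIn (PySem.Str.lower t1) (PySem.Str.lower ngramstring) &&
  (PySem.Str.isIn (PySem.Str.lower t2) (PySem.Str.lower ngramstring) &&
   PySem.Str.isIn (PySem.Str.lower t3) (PySem.Str.lower ngramstring))

def pvA_memCond (b1 b2 t1 t2 t3 : String) : Bool :=
  [PySem.Str.lower t1, PySem.Str.lower t2, PySem.Str.lower t3].contains (PySem.Str.lower b1) &&
  [PySem.Str.lower t1, PySem.Str.lower t2, PySem.Str.lower t3].contains (PySem.Str.lower b2)

def getTrisAndNgramsForBiGrams (top_bigrams : List (String × String)) (top_trigrams : List (String × String × String)) (top_ngrams : List (List String)) : List (String × String × List (List String)) :=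
  let finallist : PySem.Dict (String × String) (List (List String)) :=
    (PySem.List.slice top_bigrams none (some 15)).foldl (fun fl b =>
      let fl := fl.insert (b.1, b.2) []
      (PySem.List.slice top_trigrams none (some 30)).foldl (fun fl t =>
        if pvA_memCond b.1 b.2 t.1 t.2.1 t.2.2 then
          let st := (PySem.List.slice top_ngrams none (some 30)).foldl
            (fun (st : PySem.Dict (String × String) (List (List String)) × Bool) ngram =>
              if pvA_ngCond t.1 t.2.1 t.2.2 ngram then (st.1.modify (b.1, b.2) [] (· ++ [ngram]), true) else st)
            (fl, false)
          if st.2 = false then st.1.modify (b.1, b.2) [] (· ++ [[t.1, t.2.1, t.2.2]]) else st.1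
        else fl) fl)
      PySem.Dict.empty
  finallist.items.map (fun p => (p.1.1, p.1.2, p.2))

-- ===== PORT B =====
def pvB_entry (pool : List (List String × String)) (t : String × String × String) : PySem.Set String × List (List String) :=
  let l1 := PySem.Str.lower t.1
  let l2 := PySem.Str.lower t.2.1
  let l3 := PySem.Str.lower t.2.2
  let matched := (pool.filter (fun p => PySem.Str.isIn l1 p.2 && (PySem.Str.isIn l2 p.2 && PySem.Str.isIn l3 p.2))).map (·.1)
  (PySem.Set.ofList [l1, l2, l3], if matched.isEmpty then [[t.1, t.2.1, t.2.2]] else matched)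

def getTrisAndNgramsForBiGrams_alt (top_bigrams : List (String × String)) (top_trigrams : List (String × String × String)) (top_ngrams : List (List String)) : List (String × String × List (List String)) :=
  let pool := (PySem.List.slice top_ngrams none (some 30)).map (fun ng => (ng, PySem.Str.lower (PySem.Str.join " " ng)))
  let index := (PySem.List.slice top_trigrams none (some 30)).map (pvB_entry pool)
  let finallist : PySem.Dict (String × String) (List (List String)) :=
    (PySem.List.slice top_bigrams none (some 15)).foldl (fun fl b =>
      let out := index.foldl (fun out e =>
        if PySem.Set.contains e.1 (PySem.Str.lower b.1) && PySem.Set.contains e.1 (PySem.Str.lower b.2) then out ++ e.2 else out) []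
      fl.insert (b.1, b.2) out) PySem.Dict.empty
  finallist.items.map (fun p => (p.1.1, p.1.2, p.2))

-- ===== PRECONDITION & SPEC =====
def Spec_getTrisAndNgramsForBiGrams (top_bigrams : List (String × String)) (top_trigrams : List (String × String × String)) (top_ngrams : List (List String)) (out : List (String × String × List (List String))) : Prop := out = getTrisAndNgramsForBiGrams_alt top_bigrams top_trigrams top_ngrams
instance (top_bigrams : List (String × String)) (top_trigrams : List (String × String × String)) (top_ngrams : List (List String)) (out : List (String × String × List (List String))) : Decidable (Spec_getTrisAndNgramsForBiGrams top_bigrams top_trigrams top_ngrams out) := by unfold Spec_getTrisAndNgramsForBiGrams; infer_instance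

-- ===== CLAIM (what is proved, stated in full; the proofs are below) =====
def Claim_equal_getTrisAndNgramsForBiGrams : Prop := ∀ (top_bigrams : List (String × String)) (top_trigrams : List (String × String × String)) (top_ngrams : List (List String)), Dom_getTrisAndNgramsForBiGrams top_bigrams top_trigrams top_ngrams → Spec_getTrisAndNgramsForBiGrams top_bigrams top_trigrams top_ngrams (getTrisAndNgramsForBiGrams top_bigrams top_trigrams top_ngrams)

-- ===== LEMMAS AND PROOFS =====

-- A's per-trigram contribution, as a pure list
def pvAval (tn30 : List (List String)) (t : String × String × String) : List (List String) :=
  let m := tn30.filter (pvA_ngCond t.1 t.2.1 t.2.2)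
  if m.isEmpty then [[t.1, t.2.1, t.2.2]] else m

lemma pv_insert_modify {κ ν : Type} [BEq κ] [LawfulBEq κ] (d : PySem.Dict κ ν) (k : κ) (v : ν) (d0 : ν) (f : ν → ν) :
    (d.insert k v).modify k d0 f = d.insert k (f v) := by
  simp [PySem.Dict.modify, PySem.Dict.getD_insert_self, PySem.Dict.insert_insert_self]

lemma pv_ngloop (p : List String → Bool) (k : String × String)
    (ngs : List (List String)) (d : PySem.Dict (String × String) (List (List String)))
    (v : List (List String)) (bb : Bool) :
    ngs.foldl (fun (st : PySem.Dict (String × String) (List (List String)) × Bool) ng =>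
        if p ng then (st.1.modify k [] (· ++ [ng]), true) else st) (d.insert k v, bb)
      = (d.insert k (v ++ ngs.filter p), bb || !(ngs.filter p).isEmpty) := by
  induction ngs generalizing v bb with
  | nil => simp
  | cons ng ngs ih =>
    rw [List.foldl_cons]
    by_cases h : p ng = true
    · simp only [h, reduceIte, pv_insert_modify]
      rw [ih (v ++ [ng]) true]
      simp [h]
    · simp only [h]
      rw [if_neg (by simp), ih v bb]
      simp [h]

lemma pv_triloop (b : String × String) (tn30 : List (List String))
    (tts : List (String × String × String)) (d : PySem.Dict (String × String) (List (List String)))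
    (v : List (List String)) :
    tts.foldl (fun fl t =>
        if pvA_memCond b.1 b.2 t.1 t.2.1 t.2.2 then
          let st := tn30.foldl
            (fun (st : PySem.Dict (String × String) (List (List String)) × Bool) ngram =>
              if pvA_ngCond t.1 t.2.1 t.2.2 ngram then (st.1.modify (b.1, b.2) [] (· ++ [ngram]), true) else st)
            (fl, false)
          if st.2 = false then st.1.modify (b.1, b.2) [] (· ++ [[t.1, t.2.1, t.2.2]]) else st.1
        else fl) (d.insert (b.1, b.2) v)
      = d.insert (b.1, b.2) (tts.foldl (fun acc t =>
          if pvA_memCond b.1 b.2 t.1 t.2.1 t.2.2 then acc ++ pvAval tn30 t else acc) v) := by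
  induction tts generalizing v with
  | nil => rfl
  | cons t tts ih =>
    rw [List.foldl_cons]
    by_cases hm : pvA_memCond b.1 b.2 t.1 t.2.1 t.2.2 = true
    · simp only [hm, reduceIte]
      rw [pv_ngloop]
      by_cases he : (tn30.filter (pvA_ngCond t.1 t.2.1 t.2.2)).isEmpty = true
      · rw [if_pos (by simp [he]), pv_insert_modify, ih]
        have hnil : tn30.filter (pvA_ngCond t.1 t.2.1 t.2.2) = [] := List.isEmpty_iff.mp he
        conv_rhs => rw [List.foldl_cons, if_pos hm]
        congr 1
        simp [pvAval, hnil]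
      · rw [if_neg (by simp [he]), ih]
        conv_rhs => rw [List.foldl_cons, if_pos hm]
        congr 1
        simp [pvAval, he]
    · simp only [hm]
      rw [if_neg (by simp), ih]
      conv_rhs => rw [List.foldl_cons, if_neg hm]

lemma pv_setContains (xs : List String) (x : String) :
    PySem.Set.contains (PySem.Set.ofList xs) x = xs.contains x := by
  rw [Bool.eq_iff_iff]
  simp [PySem.Set.mem_ofList]

lemma pv_matched (t1 t2 t3 : String) (tn : List (List String)) :
    ((tn.map (fun ng => (ng, PySem.Str.lower (PySem.Str.join " " ng)))).filter
        (fun p => PySem.Str.isIn (PySem.Str.lower t1) p.2 &&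
          (PySem.Str.isIn (PySem.Str.lower t2) p.2 && PySem.Str.isIn (PySem.Str.lower t3) p.2))).map (·.1)
      = tn.filter (pvA_ngCond t1 t2 t3) := by
  induction tn with
  | nil => rfl
  | cons ng tn ih =>
    rw [List.map_cons, List.filter_cons, List.filter_cons]
    by_cases h : pvA_ngCond t1 t2 t3 ng = true
    · rw [if_pos h, if_pos (by exact h), List.map_cons, ih]
    · rw [if_neg h, if_neg (by exact h), ih]

lemma pv_entry_snd (tn : List (List String)) (t : String × String × String) :
    (pvB_entry (tn.map (fun ng => (ng, PySem.Str.lower (PySem.Str.join " " ng)))) t).2 = pvAval tn t := by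
  simp only [pvB_entry, pvAval]
  rw [pv_matched]

lemma pv_entry_cond (tn : List (List String)) (t : String × String × String) (b1 b2 : String) :
    (PySem.Set.contains (pvB_entry (tn.map (fun ng => (ng, PySem.Str.lower (PySem.Str.join " " ng)))) t).1 (PySem.Str.lower b1) &&
     PySem.Set.contains (pvB_entry (tn.map (fun ng => (ng, PySem.Str.lower (PySem.Str.join " " ng)))) t).1 (PySem.Str.lower b2))
      = pvA_memCond b1 b2 t.1 t.2.1 t.2.2 := by
  simp only [pvB_entry, pvA_memCond, pv_setContains]

lemma pv_val_eq_gen (tn30 : List (List String)) (tt30 : List (String × String × String)) (b : String × String) (acc : List (List String)) :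
    (tt30.map (pvB_entry (tn30.map (fun ng => (ng, PySem.Str.lower (PySem.Str.join " " ng)))))).foldl
        (fun out e => if PySem.Set.contains e.1 (PySem.Str.lower b.1) && PySem.Set.contains e.1 (PySem.Str.lower b.2) then out ++ e.2 else out) acc
      = tt30.foldl (fun acc t => if pvA_memCond b.1 b.2 t.1 t.2.1 t.2.2 then acc ++ pvAval tn30 t else acc) acc := by
  induction tt30 generalizing acc with
  | nil => rfl
  | cons t tts ih =>
    rw [List.map_cons, List.foldl_cons, List.foldl_cons, pv_entry_cond, pv_entry_snd, ih]

lemma pv_bigloop (tn30 : List (List String)) (tt30 : List (String × String × String))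
    (bs : List (String × String)) (fl : PySem.Dict (String × String) (List (List String))) :
    bs.foldl (fun fl b =>
        let fl := fl.insert (b.1, b.2) []
        tt30.foldl (fun fl t =>
          if pvA_memCond b.1 b.2 t.1 t.2.1 t.2.2 then
            let st := tn30.foldl
              (fun (st : PySem.Dict (String × String) (List (List String)) × Bool) ngram =>
                if pvA_ngCond t.1 t.2.1 t.2.2 ngram then (st.1.modify (b.1, b.2) [] (· ++ [ngram]), true) else st)
              (fl, false)
            if st.2 = false then st.1.modify (b.1, b.2) [] (· ++ [[t.1, t.2.1, t.2.2]]) else st.1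
          else fl) fl) fl
      = bs.foldl (fun fl b =>
          fl.insert (b.1, b.2) ((tt30.map (pvB_entry (tn30.map (fun ng => (ng, PySem.Str.lower (PySem.Str.join " " ng)))))).foldl
            (fun out e => if PySem.Set.contains e.1 (PySem.Str.lower b.1) && PySem.Set.contains e.1 (PySem.Str.lower b.2) then out ++ e.2 else out) [])) fl := by
  induction bs generalizing fl with
  | nil => rfl
  | cons b bs ih =>
    simp only [List.foldl_cons]
    rw [pv_triloop, pv_val_eq_gen, ih]

-- ===== VERDICT (by name: the statement is the Claim_ definition above) =====
theorem getTrisAndNgramsForBiGrams_spec : Claim_equal_getTrisAndNgramsForBiGrams := by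
  intro tb tt tn _
  unfold Spec_getTrisAndNgramsForBiGrams getTrisAndNgramsForBiGrams getTrisAndNgramsForBiGrams_alt
  rw [pv_bigloop]
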